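-- pv_equiv track=rewrite | github.com/Mahmoudmetwall2y/information-theory-app | codec.py | hamming_7_4_encode
-- ===== SOURCE A (Python) =====
-- from typing import Dict, List, Tuple, Optional
--
-- def _int_list_to_bitstr(bits: List[int]) -> str:
--     return "".join("1" if b else "0" for b in bits)
--
-- def hamming_7_4_encode(bitstring: str) -> Tuple[str, int]:
--     if not bitstring:
--         return "", 0
--
--     pad_bits = (4 - (len(bitstring) % 4)) % 4
--     bitstring_padded = bitstring + "0" * pad_bits
--
--     encoded_bits: List[int] = []
--
--     for i in range(0, len(bitstring_padded), 4):
--         d1 = int(bitstring_padded[i])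
--         d2 = int(bitstring_padded[i + 1])
--         d3 = int(bitstring_padded[i + 2])
--         d4 = int(bitstring_padded[i + 3])
--
--         p1 = d1 ^ d2 ^ d4
--         p2 = d1 ^ d3 ^ d4
--         p4 = d2 ^ d3 ^ d4
--
--         codeword = [p1, p2, d1, p4, d2, d3, d4]
--         encoded_bits.extend(codeword)
--
--     return _int_list_to_bitstr(encoded_bits), pad_bits
-- ===== SOURCE B (Python) =====
-- # Hamming(7,4) as a linear code: each codeword is the XOR of generator rows
-- # (7-bit integer masks) selected by the truthy data bits.
-- _ROWS = (0b1110000, 0b1001100, 0b0101010, 0b1101001)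
--
-- def hamming_7_4_encode(bitstring):
--     if not bitstring:
--         return "", 0
--     pad_bits = -len(bitstring) % 4
--     padded = bitstring + "0" * pad_bits
--     out = []
--     for i in range(0, len(padded), 4):
--         cw = 0
--         for k in range(4):
--             if int(padded[i + k]):
--                 cw ^= _ROWS[k]
--         out.append(format(cw, "07b"))
--     return "".join(out), pad_bits
-- ===== Notes on version B (the rewrite author's own statement) =====
-- stated objective: alternative
-- what changed: B treats Hamming(7,4) as a linear code: instead of computing the three parity bits per block with XOR formulas and emitting a 7-element bit list, it XOR-accumulates 7-bit integer generator-row masks for each truthy data bit and formats the resulting integer as a 7-bit binary string.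
-- outside the precondition, e.g. on hamming_7_4_encode('26'): A returns ('1111100', 2), B returns ('0111100', 2); on hamming_7_4_encode('a'): A raises ValueError, B raises ValueError
import Mathlib
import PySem

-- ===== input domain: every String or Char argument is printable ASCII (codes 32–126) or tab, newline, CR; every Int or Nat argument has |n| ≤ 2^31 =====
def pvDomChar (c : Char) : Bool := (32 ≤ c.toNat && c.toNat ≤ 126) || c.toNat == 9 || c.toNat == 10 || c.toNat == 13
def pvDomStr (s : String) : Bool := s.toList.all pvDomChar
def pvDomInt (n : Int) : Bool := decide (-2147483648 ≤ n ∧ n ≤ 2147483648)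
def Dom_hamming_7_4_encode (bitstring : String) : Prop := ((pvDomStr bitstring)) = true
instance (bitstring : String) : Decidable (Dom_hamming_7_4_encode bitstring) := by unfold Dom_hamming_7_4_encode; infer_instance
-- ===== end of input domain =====

-- B re-implements Hamming(7,4) as a linear code: per block it XOR-accumulates 7-bit integer
-- generator-row masks for each truthy data bit and formats the integer as 7 binary characters,
-- instead of A's per-bit parity formulas (objective: alternative). Pre_ restricts inputs to
-- binary bitstrings: on non-digit characters A raises ValueError, and on the other decimal
-- digits A's int-XOR-then-truthiness output differs from B's truthy-bit row selection.


-- ===== PORT A =====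
-- int(c) on a one-character digit string; exact for '0'..'9' (ValueError chars excluded by Pre_)
def pvA_intChar (c : Char) : Int := (c.toNat : Int) - 48

-- _int_list_to_bitstr: "1" if b else "0" joined
def pvA_intListToBitstr (bits : List Int) : List Char :=
  bits.map (fun b => if b ≠ 0 then '1' else '0')

def hamming_7_4_encode (bitstring : String) : String × Int :=
  if bitstring.toList = [] then ("", 0)
  else
    let pad_bits : Int := PySem.Int.mod (4 - PySem.Int.mod (bitstring.toList.length : Int) 4) 4
    let padded : List Char := bitstring.toList ++ List.replicate pad_bits.toNat '0'
    let encoded : List Int :=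
      (PySem.List.pyRange 0 (padded.length : Int) 4).foldl (fun acc i =>
        let d1 := pvA_intChar ((PySem.List.pyGet? padded i).getD ' ')
        let d2 := pvA_intChar ((PySem.List.pyGet? padded (i + 1)).getD ' ')
        let d3 := pvA_intChar ((PySem.List.pyGet? padded (i + 2)).getD ' ')
        let d4 := pvA_intChar ((PySem.List.pyGet? padded (i + 3)).getD ' ')
        let p1 := PySem.Int.bxor (PySem.Int.bxor d1 d2) d4
        let p2 := PySem.Int.bxor (PySem.Int.bxor d1 d3) d4
        let p4 := PySem.Int.bxor (PySem.Int.bxor d2 d3) d4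
        acc ++ [p1, p2, d1, p4, d2, d3, d4]) []
    (String.ofList (pvA_intListToBitstr encoded), pad_bits)

-- ===== PORT B =====
-- int(c); exact for '0'..'9' (other characters are excluded by Pre_)
def pvB_intChar (c : Char) : Int := (PySem.Int.ofChars? [c]).getD 0

-- the generator-row masks (0b1110000, 0b1001100, 0b0101010, 0b1101001)
def pvB_rows : List Int := [112, 76, 42, 105]

-- format(cw, "07b"), ported by hand; exact for 0 ≤ cw < 128 (the only values B produces)
def pvB_bin7 (n : Int) : List Char :=
  [if PySem.Int.band n 64 ≠ 0 then '1' else '0',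
   if PySem.Int.band n 32 ≠ 0 then '1' else '0',
   if PySem.Int.band n 16 ≠ 0 then '1' else '0',
   if PySem.Int.band n 8 ≠ 0 then '1' else '0',
   if PySem.Int.band n 4 ≠ 0 then '1' else '0',
   if PySem.Int.band n 2 ≠ 0 then '1' else '0',
   if PySem.Int.band n 1 ≠ 0 then '1' else '0']

def hamming_7_4_encode_alt (bitstring : String) : String × Int :=
  if bitstring.toList = [] then ("", 0)
  else
    let pad_bits : Int := PySem.Int.mod (-(bitstring.toList.length : Int)) 4
    let padded : List Char := bitstring.toList ++ List.replicate pad_bits.toNat '0'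
    let out : List Char :=
      (PySem.List.pyRange 0 (padded.length : Int) 4).foldl (fun acc i =>
        let cw : Int :=
          (PySem.List.pyRange 0 4 1).foldl (fun cw k =>
            if pvB_intChar ((PySem.List.pyGet? padded (i + k)).getD ' ') ≠ 0 then
              PySem.Int.bxor cw ((PySem.List.pyGet? pvB_rows k).getD 0)
            else cw) 0
        acc ++ pvB_bin7 cw) []
    (String.ofList out, pad_bits)

-- ===== PRECONDITION & SPEC =====
-- Pre_ excludes strings containing any non-binary character: on non-digit characters A raises
-- ValueError, and on the other decimal digits A's int-XOR artefact and B's truthy-row-selection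
-- value are different accidental readings of an input the encoder was never meant for (cite: "26").
def Pre_hamming_7_4_encode (bitstring : String) : Prop :=
  bitstring.toList.all (fun c => c == '0' || c == '1') = true
instance (bitstring : String) : Decidable (Pre_hamming_7_4_encode bitstring) := by
  unfold Pre_hamming_7_4_encode; infer_instance

def pvWitness_hamming_7_4_encode : String := "101101"

def Spec_hamming_7_4_encode (bitstring : String) (out : String × Int) : Prop := out = hamming_7_4_encode_alt bitstring
instance (bitstring : String) (out : String × Int) : Decidable (Spec_hamming_7_4_encode bitstring out) := by unfold Spec_hamming_7_4_encode; infer_instance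

-- ===== CLAIM (what is proved, stated in full; the proofs are below) =====
def Claim_equal_hamming_7_4_encode : Prop := ∀ (bitstring : String), Dom_hamming_7_4_encode bitstring → Pre_hamming_7_4_encode bitstring → Spec_hamming_7_4_encode bitstring (hamming_7_4_encode bitstring)

-- ===== LEMMAS AND PROOFS =====

theorem pv_pad_eq (L : Int) :
    PySem.Int.mod (-L) 4 = PySem.Int.mod (4 - PySem.Int.mod L 4) 4 := by
  rw [PySem.Int.mod_eq_emod_of_pos (a := -L) (by norm_num),
      PySem.Int.mod_eq_emod_of_pos (a := L) (by norm_num),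
      PySem.Int.mod_eq_emod_of_pos (by norm_num)]
  omega

-- the single-block correspondence, by 16-way case analysis
theorem pv_block_eq (c1 c2 c3 c4 : Char)
    (h1 : c1 = '0' ∨ c1 = '1') (h2 : c2 = '0' ∨ c2 = '1')
    (h3 : c3 = '0' ∨ c3 = '1') (h4 : c4 = '0' ∨ c4 = '1') :
    pvA_intListToBitstr
      [PySem.Int.bxor (PySem.Int.bxor (pvA_intChar c1) (pvA_intChar c2)) (pvA_intChar c4),
       PySem.Int.bxor (PySem.Int.bxor (pvA_intChar c1) (pvA_intChar c3)) (pvA_intChar c4),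
       pvA_intChar c1,
       PySem.Int.bxor (PySem.Int.bxor (pvA_intChar c2) (pvA_intChar c3)) (pvA_intChar c4),
       pvA_intChar c2, pvA_intChar c3, pvA_intChar c4]
    = pvB_bin7 (List.foldl (fun cw (p : Int × Char) =>
        if pvB_intChar p.2 ≠ 0 then PySem.Int.bxor cw p.1 else cw) 0
        [(112, c1), (76, c2), (42, c3), (105, c4)]) := by
  rcases h1 with rfl | rfl <;> rcases h2 with rfl | rfl <;>
    rcases h3 with rfl | rfl <;> rcases h4 with rfl | rfl <;> decide

theorem pv_range4 : PySem.List.pyRange 0 4 1 = [0, 1, 2, 3] := by decide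

-- the main loop correspondence, on the padded character list
theorem pv_main (l : List Char) (k : Nat) (hlen : l.length = 4 * k)
    (hb : ∀ c ∈ l, c = '0' ∨ c = '1') :
    pvA_intListToBitstr
      ((PySem.List.pyRange 0 (l.length : Int) 4).foldl (fun acc i =>
        let d1 := pvA_intChar ((PySem.List.pyGet? l i).getD ' ')
        let d2 := pvA_intChar ((PySem.List.pyGet? l (i + 1)).getD ' ')
        let d3 := pvA_intChar ((PySem.List.pyGet? l (i + 2)).getD ' ')
        let d4 := pvA_intChar ((PySem.List.pyGet? l (i + 3)).getD ' ')
        let p1 := PySem.Int.bxor (PySem.Int.bxor d1 d2) d4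
        let p2 := PySem.Int.bxor (PySem.Int.bxor d1 d3) d4
        let p4 := PySem.Int.bxor (PySem.Int.bxor d2 d3) d4
        acc ++ [p1, p2, d1, p4, d2, d3, d4]) [])
    = (PySem.List.pyRange 0 (l.length : Int) 4).foldl (fun acc i =>
        let cw : Int :=
          (PySem.List.pyRange 0 4 1).foldl (fun cw k =>
            if pvB_intChar ((PySem.List.pyGet? l (i + k)).getD ' ') ≠ 0 then
              PySem.Int.bxor cw ((PySem.List.pyGet? pvB_rows k).getD 0)
            else cw) 0
        acc ++ pvB_bin7 cw) [] := by
  rw [PySem.List.foldl_append_eq_flatMap, PySem.List.foldl_append_eq_flatMap]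
  simp only [List.nil_append]
  unfold pvA_intListToBitstr
  rw [List.map_flatMap]
  apply List.flatMap_congr
  intro i hi
  have hmem := (PySem.List.mem_pyRange_iff_of_pos (a := 0) (b := (l.length : Int))
    (s := 4) (by norm_num) i).mp hi
  obtain ⟨h0, hlt, hdvd⟩ := hmem
  obtain ⟨j, hj⟩ : ∃ j : Nat, i = 4 * (j : Int) := by
    obtain ⟨m, hm⟩ := hdvd
    exact ⟨m.toNat, by omega⟩
  subst hj
  have hjk : 4 * j + 3 < l.length := by
    rw [hlen]; omega
  have e1 : (4 * (j : Int)) = ((4 * j : Nat) : Int) := by push_cast; ring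
  have e2 : (((4 * j : Nat) : Int) + 1) = ((4 * j + 1 : Nat) : Int) := by push_cast; ring
  have e3 : (((4 * j : Nat) : Int) + 2) = ((4 * j + 2 : Nat) : Int) := by push_cast; ring
  have e4 : (((4 * j : Nat) : Int) + 3) = ((4 * j + 3 : Nat) : Int) := by push_cast; ring
  rw [e1, pv_range4]
  simp only [List.foldl_cons, List.foldl_nil, add_zero]
  rw [e2, e3, e4]
  simp only [PySem.List.pyGet?_natCast,
    List.getElem?_eq_getElem (show 4 * j < l.length by omega), List.getElem?_eq_getElem hjk,
    List.getElem?_eq_getElem (show 4 * j + 1 < l.length by omega),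
    List.getElem?_eq_getElem (show 4 * j + 2 < l.length by omega),
    Option.getD_some]
  have := pv_block_eq l[4 * j] l[4 * j + 1] l[4 * j + 2] l[4 * j + 3]
    (hb _ (List.getElem_mem _)) (hb _ (List.getElem_mem _))
    (hb _ (List.getElem_mem _)) (hb _ (List.getElem_mem _))
  simpa [pvA_intListToBitstr, pvB_rows, PySem.List.pyGet?] using this

-- ===== VERDICT (by name: the statement is the Claim_ definition above) =====
theorem hamming_7_4_encode_spec : Claim_equal_hamming_7_4_encode := by
  intro s _ hpre0
  have hpre : ∀ c ∈ s.toList, c = '0' ∨ c = '1' := by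
    intro c hc
    have := List.all_eq_true.mp hpre0 c hc
    rcases Bool.or_eq_true_iff.mp this with h | h
    · exact Or.inl (by simpa using h)
    · exact Or.inr (by simpa using h)
  unfold Spec_hamming_7_4_encode hamming_7_4_encode hamming_7_4_encode_alt
  by_cases hnil : s.toList = []
  · simp [hnil]
  · simp only [hnil, if_false]
    have hpad := pv_pad_eq (s.toList.length : Int)
    rw [← hpad]
    set pad : Int := PySem.Int.mod (-(s.toList.length : Int)) 4 with hpaddef
    have hpad0 : 0 ≤ pad := PySem.Int.mod_nonneg _ (by norm_num)
    have hpad4 : pad < 4 := PySem.Int.mod_lt _ (by norm_num)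
    have hdvd : (4 : Int) ∣ ((s.toList.length : Int) + pad) := by
      have : PySem.Int.mod (-(s.toList.length : Int)) 4 = (-(s.toList.length : Int)) % 4 :=
        PySem.Int.mod_eq_emod_of_pos (a := -(s.toList.length : Int)) (by norm_num)
      omega
    set l : List Char := s.toList ++ List.replicate pad.toNat '0' with hldef
    have hlen : l.length = 4 * ((l.length) / 4) := by
      have : (4 : Int) ∣ (l.length : Int) := by
        simp only [hldef, List.length_append, List.length_replicate]
        push_cast
        rw [Int.toNat_of_nonneg hpad0]
        exact hdvd
      omega
    have hb : ∀ c ∈ l, c = '0' ∨ c = '1' := by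
      intro c hc
      rcases List.mem_append.mp hc with h | h
      · exact hpre c h
      · left; exact List.eq_of_mem_replicate h
    have := pv_main l (l.length / 4) hlen hb
    simp only [Prod.mk.injEq]
    exact ⟨congrArg String.ofList this, trivial⟩
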